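-- pv_equiv track=rewrite | github.com/LiamB72/Terminale | 00-1firstClass/Revision_Practice/12.py | convertbit_to_decimals
-- ===== SOURCE A (Python) =====
-- def convertbit_to_decimals(bit_array):
--
--     decimalArray = 0
--     bitList = []
--
--     for num in bit_array:
--         digit = int(num)
--         bitList.append(digit)
--
--     for i in range(8):
--         decimalArray += bitList[i] * (2 ** i)
--
--     return decimalArray
-- ===== SOURCE B (Python) =====
-- def convertbit_to_decimals(bit_array):
--     bits = [int(x) for x in bit_array]
--
--     def horner(i):
--         if i >= 8:
--             return 0
--         return bits[i] + 2 * horner(i + 1)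
--
--     return horner(0)
-- ===== Notes on version B (the rewrite author's own statement) =====
-- stated objective: alternative
-- what changed: Replaces A's iterative power-sum sum(bit[i]*2**i) over range(8) with a recursive Horner evaluation horner(i) = bits[i] + 2*horner(i+1), eliminating the 2**i exponentiation and the accumulator loop.
import Mathlib
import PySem

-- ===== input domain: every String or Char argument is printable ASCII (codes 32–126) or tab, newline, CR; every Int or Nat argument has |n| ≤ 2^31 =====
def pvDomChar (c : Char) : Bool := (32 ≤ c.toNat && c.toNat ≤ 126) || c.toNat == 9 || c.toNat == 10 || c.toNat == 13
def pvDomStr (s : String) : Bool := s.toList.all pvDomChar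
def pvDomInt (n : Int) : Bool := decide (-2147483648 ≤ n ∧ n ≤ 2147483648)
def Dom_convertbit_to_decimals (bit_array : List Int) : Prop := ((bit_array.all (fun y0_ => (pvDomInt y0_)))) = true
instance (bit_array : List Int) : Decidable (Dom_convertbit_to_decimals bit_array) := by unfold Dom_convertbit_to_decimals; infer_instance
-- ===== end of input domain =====

-- B replaces A's indexed power-sum over range(8) with a recursive Horner evaluation bits[i] + 2*horner(i+1); same value, no 2**i.


-- ===== PORT A =====
-- int(num) is the identity on ints; bitList[i] is valid under Pre_ (length ≥ 8)
def convertbit_to_decimals (bit_array : List Int) : Int :=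
  let bitList := bit_array.foldl (fun acc num => acc ++ [num]) []
  (PySem.List.pyRange 0 8 1).foldl
    (fun decimalArray i => decimalArray + PySem.List.pyGetD bitList i 0 * 2 ^ i.toNat) 0

-- ===== PORT B =====
-- recursion on 8 - i mirrors horner(i); the 'i ≥ 8' base case is Source B's guard, pyGetD bits[i] is valid under Pre_
def hornerB (bits : List Int) (i : Nat) : Int :=
  if i ≥ 8 then 0
  else PySem.List.pyGetD bits (i : Int) 0 + 2 * hornerB bits (i + 1)
termination_by 8 - i

def convertbit_to_decimals_alt (bit_array : List Int) : Int :=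
  let bits := bit_array.map (fun x => x)
  hornerB bits 0

-- ===== PRECONDITION & SPEC =====
-- Pre_: A raises IndexError when the list has fewer than 8 elements.
def Pre_convertbit_to_decimals (bit_array : List Int) : Prop := 8 ≤ bit_array.length
instance (bit_array : List Int) : Decidable (Pre_convertbit_to_decimals bit_array) := by unfold Pre_convertbit_to_decimals; infer_instance
def pvWitness_convertbit_to_decimals : List Int := [1, 0, 1, 1, 0, 0, 1, 0]
def Spec_convertbit_to_decimals (bit_array : List Int) (out : Int) : Prop := out = convertbit_to_decimals_alt bit_array
instance (bit_array : List Int) (out : Int) : Decidable (Spec_convertbit_to_decimals bit_array out) := by unfold Spec_convertbit_to_decimals; infer_instance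

-- ===== CLAIM (what is proved, stated in full; the proofs are below) =====
def Claim_equal_convertbit_to_decimals : Prop := ∀ (bit_array : List Int), Dom_convertbit_to_decimals bit_array → Pre_convertbit_to_decimals bit_array → Spec_convertbit_to_decimals bit_array (convertbit_to_decimals bit_array)

-- ===== LEMMAS AND PROOFS =====
theorem pv_foldl_append_id (xs : List Int) :
    xs.foldl (fun acc num => acc ++ [num]) [] = xs := by
  have h : ∀ (ys acc : List Int), ys.foldl (fun acc num => acc ++ [num]) acc = acc ++ ys := by
    intro ys
    induction ys with
    | nil => simp
    | cons y ys ih => intro acc; simp [List.foldl, ih]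
  simpa using h xs []

-- ===== VERDICT (by name: the statement is the Claim_ definition above) =====
theorem convertbit_to_decimals_spec : Claim_equal_convertbit_to_decimals := by
  intro bit_array _ hpre
  unfold Spec_convertbit_to_decimals convertbit_to_decimals convertbit_to_decimals_alt
  unfold Pre_convertbit_to_decimals at hpre
  obtain ⟨a0, t, rfl⟩ : ∃ a u, bit_array = a :: u := by
    cases bit_array with | nil => simp at hpre | cons a t => exact ⟨a, t, rfl⟩
  obtain ⟨a1, t, rfl⟩ : ∃ a u, t = a :: u := by
    cases t with | nil => simp at hpre | cons a t => exact ⟨a, t, rfl⟩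
  obtain ⟨a2, t, rfl⟩ : ∃ a u, t = a :: u := by
    cases t with | nil => simp at hpre | cons a t => exact ⟨a, t, rfl⟩
  obtain ⟨a3, t, rfl⟩ : ∃ a u, t = a :: u := by
    cases t with | nil => simp at hpre | cons a t => exact ⟨a, t, rfl⟩
  obtain ⟨a4, t, rfl⟩ : ∃ a u, t = a :: u := by
    cases t with | nil => simp at hpre | cons a t => exact ⟨a, t, rfl⟩
  obtain ⟨a5, t, rfl⟩ : ∃ a u, t = a :: u := by
    cases t with | nil => simp at hpre | cons a t => exact ⟨a, t, rfl⟩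
  obtain ⟨a6, t, rfl⟩ : ∃ a u, t = a :: u := by
    cases t with | nil => simp at hpre | cons a t => exact ⟨a, t, rfl⟩
  obtain ⟨a7, t, rfl⟩ : ∃ a u, t = a :: u := by
    cases t with | nil => simp at hpre | cons a t => exact ⟨a, t, rfl⟩
  simp only [pv_foldl_append_id]
  simp [hornerB, PySem.List.pyRange, List.range_succ, PySem.List.pyGetD_ofNat']
  ring
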